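-- pv_equiv track=rewrite | github.com/oigomezz/Retos | Hackerearth/Algorithms/Graphs/Depth-First-Search/Kingdom-of-Monkeys/solution.py | find_coin
-- ===== SOURCE A (Python) =====
-- from collections import defaultdict, deque
--
-- def find_coin(start, adjacency, seen, bananas):
--     stack = deque([start])
--     seen[start] = True
--     res = 0
--     while stack:
--         vertex = stack.pop()
--         res += bananas[vertex]
--         for neighbour in adjacency[vertex]:
--             if not seen[neighbour]:
--                 stack.append(neighbour)
--                 seen[neighbour] = True
--     return res
-- ===== SOURCE B (Python) =====
-- def find_coin(start, adjacency, seen, bananas):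
--     def dfs(v):
--         seen[v] = True
--         total = bananas[v]
--         for neighbour in adjacency[v]:
--             if not seen[neighbour]:
--                 total += dfs(neighbour)
--         return total
--     return dfs(start)
-- ===== Notes on version B (the rewrite author's own statement) =====
-- stated objective: alternative
-- what changed: Replaces A's explicit deque worklist (push unseen neighbours, pop, accumulate) by a recursive dfs helper that marks a vertex on entry and returns its banana value plus the recursive sums of its still-unseen neighbours, accumulating on the call stack; traversal order differs but the component sum is the same.
import Mathlib
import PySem

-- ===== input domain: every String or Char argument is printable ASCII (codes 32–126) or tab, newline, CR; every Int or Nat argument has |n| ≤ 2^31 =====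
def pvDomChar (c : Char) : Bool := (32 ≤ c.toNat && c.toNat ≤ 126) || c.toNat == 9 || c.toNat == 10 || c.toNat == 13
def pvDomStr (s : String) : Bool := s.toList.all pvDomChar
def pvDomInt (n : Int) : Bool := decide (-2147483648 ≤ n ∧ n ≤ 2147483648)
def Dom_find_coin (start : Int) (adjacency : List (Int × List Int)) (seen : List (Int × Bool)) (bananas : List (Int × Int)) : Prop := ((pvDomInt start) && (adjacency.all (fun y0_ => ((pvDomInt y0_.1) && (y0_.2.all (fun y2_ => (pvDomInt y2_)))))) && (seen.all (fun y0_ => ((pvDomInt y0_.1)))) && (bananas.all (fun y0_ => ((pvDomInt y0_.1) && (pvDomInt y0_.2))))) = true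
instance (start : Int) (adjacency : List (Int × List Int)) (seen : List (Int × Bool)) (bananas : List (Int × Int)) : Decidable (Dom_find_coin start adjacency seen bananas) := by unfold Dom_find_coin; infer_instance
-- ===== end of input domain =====

-- B replaces A's explicit deque worklist by a recursive dfs helper that sums over the component on the
-- call stack (alternative decomposition, same asymptotic cost); both A and B mutate `seen` in place in
-- Python — the equivalence proved here is about the RETURN value.


-- ===== PORT A =====
-- number of (k, false) entries of a seen-dict: the termination measure of both traversals
def pvFc (d : PySem.Dict Int Bool) : Nat := d.items.countP (fun p => p.2 == false)

-- transliteration of A's inner `for neighbour in adjacency[vertex]` loop: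
-- append unseen neighbours (deque represented top-first, so append = cons) and mark them
def pvPush (s : PySem.Dict Int Bool) (kids : List Int) (st : List Int) : List Int × PySem.Dict Int Bool :=
  match kids with
  | [] => (st, s)
  | n :: ns =>
    match PySem.Dict.get? s n with
    | some false => pvPush (s.insert n true) ns (n :: st)
    | _ => pvPush s ns st

-- A's while loop (deque stored top-first: Python's append/pop at the right end = cons/head here).
-- The fuel (computed by the wrapper, provably sufficient: the loop pops once per iteration and only
-- unseen-then-marked vertices are ever pushed) is the standard totality device for the while loop.
def pvLoopA (adjD : PySem.Dict Int (List Int)) (ban : PySem.Dict Int Int) :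
    Nat → List Int → PySem.Dict Int Bool → Int → Int
  | 0, _, _, res => res
  | _+1, [], _, res => res
  | f+1, v :: rest, seen, res =>
    pvLoopA adjD ban f (pvPush seen (PySem.Dict.getD adjD v []) rest).1
      (pvPush seen (PySem.Dict.getD adjD v []) rest).2
      (res + PySem.Dict.getD ban v 0)

-- Python `bananas[vertex]` / `adjacency[vertex]` / `seen[neighbour]` raise KeyError on a missing key;
-- the ports use getD/get?-with-skip there, exact on Pre_ (which excludes missing keys).
def find_coin (start : Int) (adjacency : List (Int × List Int)) (seen : List (Int × Bool)) (bananas : List (Int × Int)) : Int :=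
  pvLoopA (PySem.Dict.mk adjacency) (PySem.Dict.mk bananas)
    (pvFc ((PySem.Dict.mk seen).insert start true) + 2) [start]
    ((PySem.Dict.mk seen).insert start true) 0

-- ===== PORT B =====
-- B's recursive dfs(v); the fuel (strictly more than the number of unseen entries, computed by the
-- wrapper) is the standard totality device: each nested call flips one entry false→true, so
-- pvDfs_spec below shows the fuel never runs out.  pvVisit is dfs's `for neighbour in adjacency[v]` loop.
mutual
def pvDfs (adjD : PySem.Dict Int (List Int)) (ban : PySem.Dict Int Int) :
    Nat → Int → PySem.Dict Int Bool → Int × PySem.Dict Int Bool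
  | 0, _, seen => (0, seen)
  | f+1, v, seen =>
    pvVisit adjD ban f (PySem.Dict.getD adjD v [])
      (PySem.Dict.getD ban v 0, PySem.Dict.insert seen v true)
termination_by f v seen => (f, 0, 0)

def pvVisit (adjD : PySem.Dict Int (List Int)) (ban : PySem.Dict Int Int) :
    Nat → List Int → Int × PySem.Dict Int Bool → Int × PySem.Dict Int Bool
  | _, [], acc => acc
  | f, n :: ns, acc =>
    match PySem.Dict.get? acc.2 n with
    | some false =>
      pvVisit adjD ban f ns (acc.1 + (pvDfs adjD ban f n acc.2).1, (pvDfs adjD ban f n acc.2).2)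
    | _ => pvVisit adjD ban f ns acc
termination_by f ns acc => (f, 1, ns.length)
end

def find_coin_alt (start : Int) (adjacency : List (Int × List Int)) (seen : List (Int × Bool)) (bananas : List (Int × Int)) : Int :=
  (pvDfs (PySem.Dict.mk adjacency) (PySem.Dict.mk bananas)
    (pvFc (PySem.Dict.mk seen) + 1) start (PySem.Dict.mk seen)).1

-- ===== PRECONDITION & SPEC =====
-- one closure step of the set of vertices the traversal visits: add listed neighbours that are
-- initially unseen and not collected yet
def pvGrow (adjacency : List (Int × List Int)) (seen : List (Int × Bool)) (R : List Int) : List Int :=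
  R ++ ((R.flatMap (fun v => (PySem.Dict.mk adjacency).getD v [])).filter
    (fun n => ((PySem.Dict.mk seen).get? n == some false) && !R.contains n)).dedup

def pvReachAux (adjacency : List (Int × List Int)) (seen : List (Int × Bool)) : Nat → List Int → List Int
  | 0, R => R
  | k+1, R => pvReachAux adjacency seen k (pvGrow adjacency seen R)

-- Pre_ holds exactly when Python A returns: every vertex the traversal visits (start plus the closure
-- under listed neighbours that are initially unseen) has an entry in adjacency and bananas, and every
-- listed neighbour of a visited vertex has an entry in seen (or is start, which A marks first);
-- on the excluded inputs A raises KeyError.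
def Pre_find_coin (start : Int) (adjacency : List (Int × List Int)) (seen : List (Int × Bool)) (bananas : List (Int × Int)) : Prop :=
  ∀ v ∈ pvReachAux adjacency seen (seen.length + 1) [start],
    v ∈ adjacency.map Prod.fst ∧ v ∈ bananas.map Prod.fst ∧
    ∀ n ∈ (PySem.Dict.mk adjacency).getD v [], (n ∈ seen.map Prod.fst ∨ n = start)
instance (start : Int) (adjacency : List (Int × List Int)) (seen : List (Int × Bool)) (bananas : List (Int × Int)) : Decidable (Pre_find_coin start adjacency seen bananas) := by unfold Pre_find_coin; infer_instance

def pvWitness_find_coin : Int × (List (Int × List Int)) × (List (Int × Bool)) × (List (Int × Int)) :=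
  (0, [(0, [1]), (1, [0, 1])], [(0, false), (1, false)], [(0, 3), (1, 4)])

def Spec_find_coin (start : Int) (adjacency : List (Int × List Int)) (seen : List (Int × Bool)) (bananas : List (Int × Int)) (out : Int) : Prop := out = find_coin_alt start adjacency seen bananas
instance (start : Int) (adjacency : List (Int × List Int)) (seen : List (Int × Bool)) (bananas : List (Int × Int)) (out : Int) : Decidable (Spec_find_coin start adjacency seen bananas out) := by unfold Spec_find_coin; infer_instance

-- ===== CLAIM (what is proved, stated in full; the proofs are below) =====
def Claim_equal_find_coin : Prop := ∀ (start : Int) (adjacency : List (Int × List Int)) (seen : List (Int × Bool)) (bananas : List (Int × Int)), Dom_find_coin start adjacency seen bananas → Pre_find_coin start adjacency seen bananas → Spec_find_coin start adjacency seen bananas (find_coin start adjacency seen bananas)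

-- ===== LEMMAS AND PROOFS =====

-- sum of banana values over a list of vertices
def pvS (ban : PySem.Dict Int Int) (L : List Int) : Int := (L.map (fun v => ban.getD v 0)).sum

-- neighbour list of m
def pvAdj (adjD : PySem.Dict Int (List Int)) (m : Int) : List Int := adjD.getD m []

-- the orders in which a traversal rooted at `start` can discover new vertices: each new vertex is
-- unseen in s1 (the seen-dict after marking start), not discovered before, and adjacent to start or
-- to an earlier discovery
inductive pvChain (adjD : PySem.Dict Int (List Int)) (s1 : PySem.Dict Int Bool) (start : Int) : List Int → Prop
  | nil : pvChain adjD s1 start []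
  | snoc (L : List Int) (n : Int) : pvChain adjD s1 start L → s1.get? n = some false → n ∉ L →
      (∃ m, (m = start ∨ m ∈ L) ∧ n ∈ pvAdj adjD m) → pvChain adjD s1 start (L ++ [n])

def pvClosed (adjD : PySem.Dict Int (List Int)) (s1 : PySem.Dict Int Bool) (start : Int) (L : List Int) : Prop :=
  ∀ m, (m = start ∨ m ∈ L) → ∀ n ∈ pvAdj adjD m, s1.get? n = some false → n ∈ L

-- the running seen-dict looks up as: true on start and on every discovery so far, s1 elsewhere
def pvSeenInv (s1 : PySem.Dict Int Bool) (start : Int) (L : List Int) (seen : PySem.Dict Int Bool) : Prop :=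
  ∀ k, seen.get? k = if (k = start ∨ k ∈ L) then some true else s1.get? k

theorem pvS_cons (ban : PySem.Dict Int Int) (v : Int) (L : List Int) :
    pvS ban (v :: L) = ban.getD v 0 + pvS ban L := by simp [pvS]

theorem pvS_append (ban : PySem.Dict Int Int) (L1 L2 : List Int) :
    pvS ban (L1 ++ L2) = pvS ban L1 + pvS ban L2 := by simp [pvS]

theorem pvS_reverse (ban : PySem.Dict Int Int) (L : List Int) :
    pvS ban L.reverse = pvS ban L := by simp [pvS]

theorem pvChain_nodup {adjD : PySem.Dict Int (List Int)} {s1 : PySem.Dict Int Bool} {start : Int}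
    {L : List Int} (h : pvChain adjD s1 start L) : L.Nodup := by
  induction h with
  | nil => simp
  | snoc L n _ _ hnot _ ih =>
    have hd : List.Disjoint L [n] := by
      intro a haL han
      rw [List.mem_singleton] at han
      exact hnot (han ▸ haL)
    exact ih.append (List.nodup_singleton n) hd

theorem pvChain_subset_closed {adjD : PySem.Dict Int (List Int)} {s1 : PySem.Dict Int Bool} {start : Int}
    {L1 L2 : List Int} (h1 : pvChain adjD s1 start L1) (h2 : pvClosed adjD s1 start L2) :
    ∀ n ∈ L1, n ∈ L2 := by
  induction h1 with
  | nil => simp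
  | snoc L n _ hf _ hw ih =>
    intro x hx
    rcases List.mem_append.mp hx with hx | hx
    · exact ih x hx
    · rw [List.mem_singleton] at hx; subst hx
      rcases hw with ⟨m, hm, hadj⟩
      refine h2 m ?_ x hadj hf
      rcases hm with hm | hm
      · exact Or.inl hm
      · exact Or.inr (ih m hm)

theorem pvS_eq_of_mem_iff {ban : PySem.Dict Int Int} {L1 L2 : List Int}
    (h1 : L1.Nodup) (h2 : L2.Nodup) (h : ∀ n, n ∈ L1 ↔ n ∈ L2) :
    pvS ban L1 = pvS ban L2 := by
  have hp : L1.Perm L2 := (List.perm_ext_iff_of_nodup h1 h2).mpr h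
  exact (hp.map (fun v => ban.getD v 0)).sum_eq

theorem pvFc_map_le (k : Int) (l : List (Int × Bool)) :
    (l.map (fun p => if (p.1 == k) = true then (k, true) else p)).countP (fun p => p.2 == false) ≤
      l.countP (fun p => p.2 == false) := by
  rw [List.countP_map]
  apply List.countP_mono_left
  intro a _ h
  by_cases ha : (a.1 == k) = true
  · simp [Function.comp, ha] at h
  · simpa [Function.comp, ha] using h

theorem pvFc_insert_le (d : PySem.Dict Int Bool) (k : Int) :
    pvFc (d.insert k true) ≤ pvFc d := by
  unfold pvFc PySem.Dict.insert
  split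
  · exact pvFc_map_le k d.items
  · simp [List.countP_append]

theorem pvFc_find_lt (k : Int) (p : Int × Bool) (hp : p.2 = false) :
    ∀ l : List (Int × Bool), l.find? (fun q => q.1 == k) = some p →
    (l.map (fun q => if (q.1 == k) = true then (k, true) else q)).countP (fun q => q.2 == false) <
      l.countP (fun q => q.2 == false) := by
  intro l
  induction l with
  | nil => intro hf; simp at hf
  | cons a l ih =>
    intro hf
    cases ha : (a.1 == k) with
    | true =>
      rw [List.find?_cons_of_pos (by simpa using ha)] at hf
      injection hf with hf; subst hf
      simp only [List.map_cons, List.countP_cons, ha, if_true]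
      have h1 := pvFc_map_le k l
      have h2 : ((((k : Int), true) : Int × Bool).2 == false) = false := rfl
      rw [h2, hp]
      simp only [Bool.false_eq_true, if_false, beq_self_eq_true, if_true]
      omega
    | false =>
      rw [List.find?_cons_of_neg (by simp [ha])] at hf
      have := ih hf
      simp only [List.map_cons, List.countP_cons, ha, Bool.false_eq_true, if_false]
      omega

theorem pvFc_insert_lt (d : PySem.Dict Int Bool) (k : Int) (h : d.get? k = some false) :
    pvFc (d.insert k true) < pvFc d := by
  have hc : d.contains k = true := by
    rw [PySem.Dict.contains_eq_isSome_get?, h]; rfl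
  unfold PySem.Dict.get? at h
  rcases hf : d.items.find? (fun p => p.1 == k) with _ | p
  · rw [hf] at h; simp at h
  · rw [hf] at h
    simp only [Option.map_some, Option.some.injEq] at h
    unfold pvFc PySem.Dict.insert
    rw [if_pos hc]
    exact pvFc_find_lt k p h d.items hf

theorem pvPush_measure (kids : List Int) : ∀ (st : List Int) (s : PySem.Dict Int Bool),
    pvFc (pvPush s kids st).2 + (pvPush s kids st).1.length ≤ pvFc s + st.length := by
  induction kids with
  | nil => intro st s; simp [pvPush]
  | cons n ns ih =>
    intro st s
    simp only [pvPush]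
    rcases h : PySem.Dict.get? s n with _ | b
    · simpa using ih st s
    · cases b
      · have h1 := pvFc_insert_lt s n h
        have h2 := ih (n :: st) (s.insert n true)
        simp only [List.length_cons] at h2 ⊢
        omega
      · simpa using ih st s

-- pvDfs/pvVisit only ever insert `true`, so the number of unseen entries never grows
theorem pvVisit_fc (adjD : PySem.Dict Int (List Int)) (ban : PySem.Dict Int Int) (f : Nat)
    (hdfs : ∀ (v : Int) (s : PySem.Dict Int Bool), pvFc (pvDfs adjD ban f v s).2 ≤ pvFc s) :
    ∀ (ns : List Int) (acc : Int × PySem.Dict Int Bool),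
      pvFc (pvVisit adjD ban f ns acc).2 ≤ pvFc acc.2 := by
  intro ns
  induction ns with
  | nil => intro acc; rw [pvVisit]
  | cons n ns ih =>
    intro acc
    rw [pvVisit]
    rcases hg : PySem.Dict.get? acc.2 n with _ | b
    · simpa using ih acc
    · cases b
      · simp only
        exact le_trans (ih _) (hdfs n acc.2)
      · simpa using ih acc

theorem pvDfs_fc (adjD : PySem.Dict Int (List Int)) (ban : PySem.Dict Int Int) :
    ∀ (f : Nat) (v : Int) (s : PySem.Dict Int Bool),
      pvFc (pvDfs adjD ban f v s).2 ≤ pvFc s := by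
  intro f
  induction f with
  | zero => intro v s; rw [pvDfs]
  | succ f ih =>
    intro v s
    rw [pvDfs]
    exact le_trans (pvVisit_fc adjD ban f ih _ _) (pvFc_insert_le s v)

-- pvPush's effect: it pushes (in reverse, on top) exactly the kids not yet seen, marking them
theorem pvPush_spec (adjD : PySem.Dict Int (List Int)) (s1 : PySem.Dict Int Bool) (start : Int)
    (hstart : s1.get? start = some true)
    (kids : List Int) : ∀ (st : List Int) (s : PySem.Dict Int Bool) (L : List Int),
    pvChain adjD s1 start L → pvSeenInv s1 start L s →
    (∀ n ∈ kids, ∃ m, (m = start ∨ m ∈ L) ∧ n ∈ pvAdj adjD m) →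
    ∃ N, (pvPush s kids st).1 = N.reverse ++ st ∧
      pvChain adjD s1 start (L ++ N) ∧
      pvSeenInv s1 start (L ++ N) (pvPush s kids st).2 ∧
      (∀ n ∈ kids, s1.get? n = some false → n ∈ L ++ N) := by
  induction kids with
  | nil =>
    intro st s L hc hs _
    exact ⟨[], by simp [pvPush], by simpa using hc, by simpa using hs, by simp⟩
  | cons n ns ih =>
    intro st s L hc hs hw
    simp only [pvPush]
    have hsn := hs n
    rcases hg : PySem.Dict.get? s n with _ | b
    · -- n missing from seen: Python raises, the port skips (outside Pre_)
      rw [hg] at hsn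
      obtain ⟨N, h1, h2, h3, h4⟩ := ih st s L hc hs (fun x hx => hw x (List.mem_cons_of_mem n hx))
      refine ⟨N, h1, h2, h3, ?_⟩
      intro x hx hfx
      rcases List.mem_cons.mp hx with rfl | hx
      · split at hsn
        · simp at hsn
        · rw [← hsn] at hfx; simp at hfx
      · exact h4 x hx hfx
    · cases b
      · -- unseen: push and mark
        rw [hg] at hsn
        have hcond : ¬(n = start ∨ n ∈ L) := by
          intro h
          rw [if_pos h] at hsn
          simp at hsn
        rw [if_neg hcond] at hsn
        have hfn : s1.get? n = some false := hsn.symm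
        have hnotL : n ∉ L := fun h => hcond (Or.inr h)
        have hc' : pvChain adjD s1 start (L ++ [n]) :=
          pvChain.snoc L n hc hfn hnotL (hw n List.mem_cons_self)
        have hs' : pvSeenInv s1 start (L ++ [n]) (s.insert n true) := by
          intro k
          rw [PySem.Dict.get?_insert]
          by_cases hk : k = n
          · subst hk
            rw [if_pos rfl, if_pos (Or.inr (by simp))]
          · rw [if_neg hk, hs k]
            have : (k = start ∨ k ∈ L ++ [n]) ↔ (k = start ∨ k ∈ L) := by
              simp [List.mem_append, hk]
            by_cases hck : k = start ∨ k ∈ L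
            · rw [if_pos hck, if_pos (this.mpr hck)]
            · rw [if_neg hck, if_neg (fun h => hck (this.mp h))]
        have hw' : ∀ x ∈ ns, ∃ m, (m = start ∨ m ∈ L ++ [n]) ∧ x ∈ pvAdj adjD m := by
          intro x hx
          obtain ⟨m, hm, ha⟩ := hw x (List.mem_cons_of_mem n hx)
          exact ⟨m, hm.imp id (fun h => List.mem_append_left _ h), ha⟩
        obtain ⟨N', h1, h2, h3, h4⟩ := ih (n :: st) (s.insert n true) (L ++ [n]) hc' hs' hw'
        have hkey : (L ++ [n]) ++ N' = L ++ n :: N' := by simp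
        refine ⟨n :: N', ?_, ?_, ?_, ?_⟩
        · rw [h1]; simp
        · rw [← hkey]; exact h2
        · rw [← hkey]; exact h3
        · intro x hx hfx
          rcases List.mem_cons.mp hx with rfl | hx
          · exact List.mem_append_right _ List.mem_cons_self
          · rw [← hkey]; exact h4 x hx hfx
      · -- already seen
        rw [hg] at hsn
        obtain ⟨N, h1, h2, h3, h4⟩ := ih st s L hc hs (fun x hx => hw x (List.mem_cons_of_mem n hx))
        refine ⟨N, h1, h2, h3, ?_⟩
        intro x hx hfx
        rcases List.mem_cons.mp hx with rfl | hx
        · by_cases hck : x = start ∨ x ∈ L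
          · rcases hck with rfl | hck
            · rw [hstart] at hfx; simp at hfx
            · exact List.mem_append_left _ hck
          · rw [if_neg hck] at hsn
            rw [← hsn] at hfx; simp at hfx
        · exact h4 x hx hfx

-- A's loop invariant: with sufficient fuel it returns res + the bananas of the pending stack +
-- those of the rest of the component, and the discoveries form a closed chain
theorem pvLoopA_spec (adjD : PySem.Dict Int (List Int)) (ban : PySem.Dict Int Int)
    (s1 : PySem.Dict Int Bool) (start : Int) (hstart : s1.get? start = some true) :
    ∀ (f : Nat) (st : List Int) (s : PySem.Dict Int Bool) (res : Int) (L : List Int),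
    pvChain adjD s1 start L →
    (∀ v ∈ st, v = start ∨ v ∈ L) →
    pvSeenInv s1 start L s →
    (∀ m, (m = start ∨ m ∈ L) → m ∉ st → ∀ n ∈ pvAdj adjD m, s1.get? n = some false → n ∈ L) →
    pvFc s + st.length + 1 ≤ f →
    ∃ L1, pvChain adjD s1 start (L ++ L1) ∧ pvClosed adjD s1 start (L ++ L1) ∧
      pvLoopA adjD ban f st s res = res + pvS ban st + pvS ban L1 := by
  intro f
  induction f with
  | zero => intro st s res L _ _ _ _ hf; omega
  | succ f ih =>
    intro st s res L hc hst hs hproc hf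
    cases st with
    | nil =>
      rw [pvLoopA]
      refine ⟨[], by simpa using hc, ?_, by simp [pvS]⟩
      intro m hm n hn hfq
      simp only [List.append_nil] at hm ⊢
      exact hproc m hm (by simp) n hn hfq
    | cons v rest =>
      obtain ⟨N, hstk, hcN, hsN, hkids⟩ :=
        pvPush_spec adjD s1 start hstart (PySem.Dict.getD adjD v []) rest s L hc hs
          (fun n hn => ⟨v, hst v List.mem_cons_self, hn⟩)
      obtain ⟨L1, hc1, hcl1, heq⟩ := ih (pvPush s (PySem.Dict.getD adjD v []) rest).1
        (pvPush s (PySem.Dict.getD adjD v []) rest).2 (res + PySem.Dict.getD ban v 0) (L ++ N) hcN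
        (by
          intro x hx
          rw [hstk] at hx
          rcases List.mem_append.mp hx with hx | hx
          · exact Or.inr (List.mem_append_right _ (List.mem_reverse.mp hx))
          · exact (hst x (List.mem_cons_of_mem v hx)).imp id (List.mem_append_left _))
        hsN
        (by
          intro m hm hnm n hn hfq
          rw [hstk] at hnm
          by_cases hmv : m = v
          · subst hmv; exact hkids n hn hfq
          · rcases hm with rfl | hm
            · exact List.mem_append_left _
                (hproc m (Or.inl rfl)
                  (by
                    intro h
                    rcases List.mem_cons.mp h with h | h
                    · exact hmv h
                    · exact hnm (List.mem_append_right _ h)) n hn hfq)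
            · rcases List.mem_append.mp hm with hm | hm
              · exact List.mem_append_left _
                  (hproc m (Or.inr hm)
                    (by
                      intro h
                      rcases List.mem_cons.mp h with h | h
                      · exact hmv h
                      · exact hnm (List.mem_append_right _ h)) n hn hfq)
              · exact absurd (List.mem_append_left _ (List.mem_reverse.mpr hm)) hnm)
        (by
          have := pvPush_measure (PySem.Dict.getD adjD v []) rest s
          simp only [List.length_cons] at hf
          omega)
      have hkey : (L ++ N) ++ L1 = L ++ (N ++ L1) := by simp
      refine ⟨N ++ L1, by rw [← hkey]; exact hc1, by rw [← hkey]; exact hcl1, ?_⟩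
      rw [pvLoopA, heq, hstk, pvS_append, pvS_append, pvS_reverse, pvS_cons]
      omega

-- B's dfs invariant: dfs v returns bananas[v] + the bananas of the new discoveries, which extend the
-- chain; v's unseen neighbours and those of every discovery end up discovered
theorem pvVisit_spec (adjD : PySem.Dict Int (List Int)) (ban : PySem.Dict Int Int)
    (s1 : PySem.Dict Int Bool) (start : Int) (hstart : s1.get? start = some true) (f : Nat)
    (IH : ∀ (v : Int) (s : PySem.Dict Int Bool) (Lp : List Int),
      pvChain adjD s1 start Lp →
      (v = start ∨ v ∈ Lp) →
      pvSeenInv s1 start Lp (s.insert v true) →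
      pvFc (s.insert v true) + 1 ≤ f →
      ∃ L1, pvChain adjD s1 start (Lp ++ L1) ∧
        pvSeenInv s1 start (Lp ++ L1) (pvDfs adjD ban f v s).2 ∧
        (pvDfs adjD ban f v s).1 = ban.getD v 0 + pvS ban L1 ∧
        (∀ n ∈ pvAdj adjD v, s1.get? n = some false → n ∈ Lp ++ L1) ∧
        (∀ m ∈ L1, ∀ n ∈ pvAdj adjD m, s1.get? n = some false → n ∈ Lp ++ L1)) :
    ∀ (ns : List Int) (acc : Int × PySem.Dict Int Bool) (L : List Int),
    pvChain adjD s1 start L →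
    pvSeenInv s1 start L acc.2 →
    (∀ n ∈ ns, ∃ m, (m = start ∨ m ∈ L) ∧ n ∈ pvAdj adjD m) →
    pvFc acc.2 ≤ f →
    ∃ L1, pvChain adjD s1 start (L ++ L1) ∧
      pvSeenInv s1 start (L ++ L1) (pvVisit adjD ban f ns acc).2 ∧
      (pvVisit adjD ban f ns acc).1 = acc.1 + pvS ban L1 ∧
      (∀ n ∈ ns, s1.get? n = some false → n ∈ L ++ L1) ∧
      (∀ m ∈ L1, ∀ n ∈ pvAdj adjD m, s1.get? n = some false → n ∈ L ++ L1) := by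
  intro ns
  induction ns with
  | nil =>
    intro acc L hc hs _ _
    exact ⟨[], by simpa using hc, by rw [pvVisit]; simpa using hs, by rw [pvVisit]; simp [pvS],
      by simp, by simp⟩
  | cons n ns ih =>
    intro acc L hc hs hw hfuel
    rw [pvVisit]
    have hsn := hs n
    rcases hg : PySem.Dict.get? acc.2 n with _ | b
    · -- n missing from seen: Python raises, the port skips (outside Pre_)
      rw [hg] at hsn
      obtain ⟨N, h1, h2, h3, h4, h5⟩ :=
        ih acc L hc hs (fun x hx => hw x (List.mem_cons_of_mem n hx)) hfuel
      refine ⟨N, h1, h2, h3, ?_, h5⟩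
      intro x hx hfx
      rcases List.mem_cons.mp hx with rfl | hx
      · split at hsn
        · simp at hsn
        · rw [← hsn] at hfx; simp at hfx
      · exact h4 x hx hfx
    · cases b
      · -- unseen neighbour: recurse
        simp only
        rw [hg] at hsn
        have hcond : ¬(n = start ∨ n ∈ L) := by
          intro h
          rw [if_pos h] at hsn
          simp at hsn
        rw [if_neg hcond] at hsn
        have hfn : s1.get? n = some false := hsn.symm
        have hnotL : n ∉ L := fun h => hcond (Or.inr h)
        have hc' : pvChain adjD s1 start (L ++ [n]) :=
          pvChain.snoc L n hc hfn hnotL (hw n List.mem_cons_self)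
        have hs' : pvSeenInv s1 start (L ++ [n]) (acc.2.insert n true) := by
          intro k
          rw [PySem.Dict.get?_insert]
          by_cases hk : k = n
          · subst hk
            rw [if_pos rfl, if_pos (Or.inr (by simp))]
          · rw [if_neg hk, hs k]
            have heqv : (k = start ∨ k ∈ L ++ [n]) ↔ (k = start ∨ k ∈ L) := by
              simp [List.mem_append, hk]
            by_cases hck : k = start ∨ k ∈ L
            · rw [if_pos hck, if_pos (heqv.mpr hck)]
            · rw [if_neg hck, if_neg (fun h => hck (heqv.mp h))]
        obtain ⟨L1', hcd, hsd, hval, hadjn, hprocd⟩ :=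
          IH n acc.2 (L ++ [n]) hc' (Or.inr (List.mem_append_right _ List.mem_cons_self)) hs'
            (by have := pvFc_insert_lt acc.2 n hg; omega)
        obtain ⟨L1'', hc'', hs'', hval'', h4'', h5''⟩ :=
          ih (acc.1 + (pvDfs adjD ban f n acc.2).1, (pvDfs adjD ban f n acc.2).2)
            ((L ++ [n]) ++ L1') hcd hsd
            (by
              intro x hx
              obtain ⟨m, hm, ha⟩ := hw x (List.mem_cons_of_mem n hx)
              exact ⟨m, hm.imp id (fun h => List.mem_append_left _ (List.mem_append_left _ h)), ha⟩)
            (le_trans (pvDfs_fc adjD ban f n acc.2) hfuel)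
        have hkey : ((L ++ [n]) ++ L1') ++ L1'' = L ++ (n :: (L1' ++ L1'')) := by simp
        refine ⟨n :: (L1' ++ L1''), by rw [← hkey]; exact hc'', by rw [← hkey]; exact hs'', ?_, ?_, ?_⟩
        · rw [hval'', hval, pvS_cons, pvS_append]
          omega
        · intro x hx hfx
          rcases List.mem_cons.mp hx with rfl | hx
          · exact List.mem_append_right _ List.mem_cons_self
          · rw [← hkey]; exact h4'' x hx hfx
        · intro m hm x hx hfx
          rcases List.mem_cons.mp hm with rfl | hm
          · rw [← hkey]
            exact List.mem_append_left _ (hadjn x hx hfx)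
          · rcases List.mem_append.mp hm with hm | hm
            · rw [← hkey]
              exact List.mem_append_left _ (hprocd m hm x hx hfx)
            · rw [← hkey]
              exact h5'' m hm x hx hfx
      · -- already seen neighbour: skip
        simp only
        rw [hg] at hsn
        obtain ⟨N, h1, h2, h3, h4, h5⟩ :=
          ih acc L hc hs (fun x hx => hw x (List.mem_cons_of_mem n hx)) hfuel
        refine ⟨N, h1, h2, h3, ?_, h5⟩
        intro x hx hfx
        rcases List.mem_cons.mp hx with rfl | hx
        · by_cases hck : x = start ∨ x ∈ L
          · rcases hck with rfl | hck
            · rw [hstart] at hfx; simp at hfx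
            · exact List.mem_append_left _ hck
          · rw [if_neg hck] at hsn
            rw [← hsn] at hfx; simp at hfx
        · exact h4 x hx hfx

theorem pvDfs_spec (adjD : PySem.Dict Int (List Int)) (ban : PySem.Dict Int Int)
    (s1 : PySem.Dict Int Bool) (start : Int) (hstart : s1.get? start = some true) :
    ∀ (f : Nat) (v : Int) (s : PySem.Dict Int Bool) (Lp : List Int),
    pvChain adjD s1 start Lp →
    (v = start ∨ v ∈ Lp) →
    pvSeenInv s1 start Lp (s.insert v true) →
    pvFc (s.insert v true) + 1 ≤ f →
    ∃ L1, pvChain adjD s1 start (Lp ++ L1) ∧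
      pvSeenInv s1 start (Lp ++ L1) (pvDfs adjD ban f v s).2 ∧
      (pvDfs adjD ban f v s).1 = ban.getD v 0 + pvS ban L1 ∧
      (∀ n ∈ pvAdj adjD v, s1.get? n = some false → n ∈ Lp ++ L1) ∧
      (∀ m ∈ L1, ∀ n ∈ pvAdj adjD m, s1.get? n = some false → n ∈ Lp ++ L1) := by
  intro f
  induction f with
  | zero => intro v s Lp _ _ _ hfuel; omega
  | succ f ihf =>
    intro v s Lp hc hv hs hfuel
    rw [pvDfs]
    obtain ⟨L1, h1, h2, h3, h4, h5⟩ :=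
      pvVisit_spec adjD ban s1 start hstart f ihf (PySem.Dict.getD adjD v [])
        (PySem.Dict.getD ban v 0, PySem.Dict.insert s v true) Lp hc hs
        (fun n hn => ⟨v, hv, hn⟩) (by show pvFc (s.insert v true) ≤ f; omega)
    exact ⟨L1, h1, h2, h3, h4, h5⟩

-- ===== VERDICT (by name: the statement is the Claim_ definition above) =====
theorem find_coin_spec : Claim_equal_find_coin := by
  intro start adjacency seen bananas _ _
  unfold Spec_find_coin find_coin find_coin_alt
  have hstart : ((PySem.Dict.mk seen).insert start true).get? start = some true :=
    PySem.Dict.get?_insert_self _ _ _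
  have hs0 : pvSeenInv ((PySem.Dict.mk seen).insert start true) start []
      ((PySem.Dict.mk seen).insert start true) := by
    intro k
    by_cases hk : k = start
    · subst hk
      rw [if_pos (Or.inl rfl), hstart]
    · rw [if_neg (by simp [hk])]
  obtain ⟨LA, hcA, hclA, heqA⟩ :=
    pvLoopA_spec (PySem.Dict.mk adjacency) (PySem.Dict.mk bananas)
      ((PySem.Dict.mk seen).insert start true) start hstart
      (pvFc ((PySem.Dict.mk seen).insert start true) + 2)
      [start] ((PySem.Dict.mk seen).insert start true) 0 []
      pvChain.nil (by simp) hs0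
      (by
        intro m hm hnm
        rcases hm with rfl | hm
        · exact absurd List.mem_cons_self hnm
        · simp at hm)
      (by simp)
  obtain ⟨LB, hcB, _, hvalB, h4B, h5B⟩ :=
    pvDfs_spec (PySem.Dict.mk adjacency) (PySem.Dict.mk bananas)
      ((PySem.Dict.mk seen).insert start true) start hstart
      (pvFc (PySem.Dict.mk seen) + 1) start (PySem.Dict.mk seen) []
      pvChain.nil (Or.inl rfl) hs0
      (by have := pvFc_insert_le (PySem.Dict.mk seen) start; omega)
  simp only [List.nil_append] at hcA hclA hcB h4B h5B
  have hclB : pvClosed (PySem.Dict.mk adjacency) ((PySem.Dict.mk seen).insert start true) start LB := by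
    intro m hm n hn hf
    rcases hm with rfl | hm
    · exact h4B n hn hf
    · exact h5B m hm n hn hf
  have hmem : ∀ n, n ∈ LA ↔ n ∈ LB :=
    fun n => ⟨fun h => pvChain_subset_closed hcA hclB n h,
              fun h => pvChain_subset_closed hcB hclA n h⟩
  have hS : pvS (PySem.Dict.mk bananas) LA = pvS (PySem.Dict.mk bananas) LB :=
    pvS_eq_of_mem_iff (pvChain_nodup hcA) (pvChain_nodup hcB) hmem
  rw [heqA, hvalB, pvS_cons, hS]
  simp only [pvS, List.map_nil, List.sum_nil]
  omega
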